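-- pv_equiv track=rewrite | github.com/binduhegde/leetcode | 1909.py | check_inc
-- ===== SOURCE A (Python) =====
-- def check_inc(nums):
--     for i in nums:
--         temp = nums[:]
--         temp.remove(i)
--         for j in range(1, len(temp)):
--             if not temp[j] > temp[j-1]:
--                 return False
--     return True
-- ===== SOURCE B (Python) =====
-- def check_inc(nums):
--     # suffix-increasing flags precomputed once; each first-occurrence removal
--     # index is then checked with a running prefix flag and boundary compare.
--     n = len(nums)
--     suf = [True] * (n + 1)          # suf[k]: nums[k:] strictly increasing
--     for k in range(n - 2, -1, -1):
--         suf[k] = nums[k] < nums[k + 1] and suf[k + 1]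
--     seen = set()
--     pre = True                      # nums[:k] strictly increasing
--     for k in range(n):
--         v = nums[k]
--         if v not in seen:
--             seen.add(v)
--             if not (pre and suf[k + 1]
--                     and (k == 0 or k == n - 1 or nums[k - 1] < nums[k + 1])):
--                 return False
--         if k > 0:
--             pre = pre and nums[k - 1] < nums[k]
--     return True
-- ===== Notes on version B (the rewrite author's own statement) =====
-- stated objective: alternative
-- what changed: Replaces A's rebuild-and-rescan per element (copy the list, remove the first occurrence, rescan all adjacent pairs) by a single precomputed suffix-increasing array plus a running prefix flag and a seen-set, checking each first-occurrence removal index with a constant number of comparisons.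
import Mathlib
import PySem

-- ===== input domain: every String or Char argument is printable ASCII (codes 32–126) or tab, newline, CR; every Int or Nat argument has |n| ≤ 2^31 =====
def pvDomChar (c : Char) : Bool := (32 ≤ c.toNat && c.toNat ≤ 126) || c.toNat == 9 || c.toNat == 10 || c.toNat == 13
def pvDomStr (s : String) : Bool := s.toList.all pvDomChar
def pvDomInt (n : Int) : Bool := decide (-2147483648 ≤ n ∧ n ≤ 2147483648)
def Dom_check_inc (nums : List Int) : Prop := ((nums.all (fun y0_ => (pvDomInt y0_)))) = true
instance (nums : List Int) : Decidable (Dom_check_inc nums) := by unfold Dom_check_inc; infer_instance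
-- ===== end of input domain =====

-- B replaces A's copy-remove-rescan per element by a precomputed suffix-flag
-- array plus a running prefix flag and a seen-set, one boundary check per
-- first-occurrence index; same return value on every input.

-- ===== PORT A =====
-- inner loop: 'for j in range(1, len(temp)): if not temp[j] > temp[j-1]: return False'
def innerA (temp : List Int) : Bool :=
  (PySem.List.pyRange 1 (temp.length : Int) 1).all fun j =>
    decide (PySem.List.pyGetD temp j 0 > PySem.List.pyGetD temp (j - 1) 0)

-- outer loop 'for i in nums' with early 'return False'
def aLoop (nums : List Int) : List Int → Bool
  | [] => true
  | i :: rest =>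
    -- temp = nums[:]; temp.remove(i) — i comes from nums itself, so remove? is always some
    let temp := (PySem.List.remove? nums i).getD []
    if innerA temp then aLoop nums rest else false

def check_inc (nums : List Int) : Bool := aLoop nums nums

-- ===== PORT B =====
-- Source B's backward loop filling suf (suf[k] = nums[k:] strictly increasing),
-- ported as the equivalent right-fold: suf[k] computed from suf[k+1]
def sufArr : List Int → List Bool
  | [] => [true]
  | a :: rest =>
    let s := sufArr rest
    (match rest with
     | [] => true
     | b :: _ => decide (a < b) && s.headD true) :: s

-- Source B's main loop: k over range(n) with v = nums[k], carrying seen and pre;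
-- 'return False' becomes the early false result
def altLoop (nums : List Int) (suf : List Bool) (n : Nat) :
    List Int → Nat → PySem.Set Int → Bool → Bool
  | [], _, _, _ => true
  | v :: rs, k, seen, pre =>
    if !(PySem.Set.contains seen v) &&
        !(pre && suf.getD (k + 1) true &&
          (decide (k = 0) || decide (k = n - 1) ||
            decide (nums.getD (k - 1) 0 < nums.getD (k + 1) 0))) then
      false
    else
      altLoop nums suf n rs (k + 1)
        (PySem.Set.add seen v)  -- Python adds only when v ∉ seen; Set.add is the identity then
        (if 0 < k then pre && decide (nums.getD (k - 1) 0 < nums.getD k 0) else pre)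

def check_inc_alt (nums : List Int) : Bool :=
  altLoop nums (sufArr nums) nums.length nums 0 PySem.Set.empty true

-- ===== PRECONDITION & SPEC =====
def Spec_check_inc (nums : List Int) (out : Bool) : Prop := out = check_inc_alt nums
instance (nums : List Int) (out : Bool) : Decidable (Spec_check_inc nums out) := by unfold Spec_check_inc; infer_instance

-- ===== CLAIM (what is proved, stated in full; the proofs are below) =====
def Claim_equal_check_inc : Prop := ∀ (nums : List Int), Dom_check_inc nums → Spec_check_inc nums (check_inc nums)

-- ===== LEMMAS AND PROOFS =====

-- the per-index condition B checks at a first-occurrence index j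
def condAt (nums : List Int) (j : Nat) : Prop :=
  List.IsChain (· < ·) (nums.take j) ∧ List.IsChain (· < ·) (nums.drop (j + 1)) ∧
    (j = 0 ∨ j = nums.length - 1 ∨ nums.getD (j - 1) 0 < nums.getD (j + 1) 0)

-- A's inner scan checks exactly "temp is strictly increasing"
theorem innerA_iff (temp : List Int) :
    innerA temp = true ↔ List.IsChain (· < ·) temp := by
  simp only [innerA, List.all_eq_true, PySem.List.mem_pyRange_one, decide_eq_true_iff,
    gt_iff_lt, List.isChain_iff_getElem]
  constructor
  · intro h i hi
    have h1 : (1:Int) ≤ (i:Int) + 1 := by omega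
    have h2 : (i:Int) + 1 < (temp.length : Int) := by exact_mod_cast hi
    have := h ((i:Int)+1) ⟨h1, h2⟩
    rw [show (i:Int) + 1 - 1 = ((i:Nat):Int) by ring,
        show (i:Int) + 1 = (((i+1:Nat)):Int) by push_cast; ring,
        PySem.List.pyGetD_natCast, PySem.List.pyGetD_natCast,
        List.getD_eq_getElem _ _ (by omega), List.getD_eq_getElem _ _ hi] at this
    exact this
  · intro h j hj
    obtain ⟨h1, h2⟩ := hj
    obtain ⟨i, rfl⟩ : ∃ i : Nat, j = ((i+1:Nat):Int) := ⟨(j-1).toNat, by omega⟩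
    have hi : i + 1 < temp.length := by exact_mod_cast h2
    rw [show (((i+1:Nat)):Int) - 1 = ((i:Nat):Int) by push_cast; ring,
        PySem.List.pyGetD_natCast, PySem.List.pyGetD_natCast,
        List.getD_eq_getElem _ _ (by omega), List.getD_eq_getElem _ _ hi]
    exact h i hi

theorem aLoop_iff (nums : List Int) (l : List Int) (hl : ∀ i ∈ l, i ∈ nums) :
    aLoop nums l = true ↔ ∀ i ∈ l, List.IsChain (· < ·) (nums.erase i) := by
  induction l with
  | nil => simp [aLoop]
  | cons i rest ih =>
    have hi : i ∈ nums := hl i List.mem_cons_self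
    simp only [aLoop, PySem.List.remove?_eq_some_erase nums i hi, Option.getD_some]
    by_cases hc : List.IsChain (· < ·) (nums.erase i)
    · rw [if_pos ((innerA_iff _).mpr hc), ih (fun x hx => hl x (List.mem_cons_of_mem _ hx))]
      simp [hc]
    · rw [if_neg (by simpa using fun h => hc ((innerA_iff _).mp h))]
      exact iff_of_false (by simp) (fun H => hc (H i List.mem_cons_self))

theorem mem_take_iff_idxOf_lt (l : List Int) (a : Int) (j : Nat) (ha : a ∈ l) :
    a ∈ l.take j ↔ List.idxOf a l < j := by
  induction l generalizing j with
  | nil => simp at ha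
  | cons x t ih =>
    cases j with
    | zero => simp
    | succ j =>
      by_cases hx : a = x
      · subst hx
        simp [List.idxOf_cons_self]
      · have hat : a ∈ t := by
          rcases List.mem_cons.mp ha with h | h
          · exact absurd h hx
          · exact h
        rw [List.take_succ_cons, List.mem_cons, List.idxOf_cons_ne _ (by simpa using Ne.symm hx)]
        simp [hx, ih j hat]

-- "every value's first-occurrence removal" = "removal at every first-occurrence index"
theorem bridge_iff (nums : List Int) :
    (∀ i ∈ nums, List.IsChain (· < ·) (nums.erase i)) ↔
      ∀ j, j < nums.length → nums.getD j 0 ∉ nums.take j →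
        List.IsChain (· < ·) (nums.eraseIdx j) := by
  constructor
  · intro H j hj hf
    rw [List.getD_eq_getElem _ _ hj] at hf
    have hmem : nums[j] ∈ nums := List.getElem_mem hj
    have hub : nums[j] ∈ nums.take (j+1) := by
      have : (nums.take (j+1))[j]'(by simp [List.length_take]; omega) = nums[j] :=
        List.getElem_take
      rw [← this]; exact List.getElem_mem _
    have h1 : List.idxOf nums[j] nums < j + 1 :=
      (mem_take_iff_idxOf_lt nums nums[j] (j+1) hmem).mp hub
    have h2 : ¬ List.idxOf nums[j] nums < j := fun h =>
      hf ((mem_take_iff_idxOf_lt nums nums[j] j hmem).mpr h)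
    have hidx : List.idxOf nums[j] nums = j := by omega
    rw [← List.erase_eq_eraseIdx_of_idxOf hidx]
    exact H _ hmem
  · intro H i hi
    have hj : List.idxOf i nums < nums.length := List.idxOf_lt_length_of_mem hi
    have hget : nums[List.idxOf i nums] = i := List.getElem_idxOf hj
    have hf : nums.getD (List.idxOf i nums) 0 ∉ nums.take (List.idxOf i nums) := by
      rw [List.getD_eq_getElem _ _ hj, hget]
      intro hmem
      exact absurd ((mem_take_iff_idxOf_lt nums i _ hi).mp hmem) (by omega)
    rw [List.erase_eq_eraseIdx_of_idxOf rfl]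
    exact H _ hj hf

theorem getLast?_take_eq (nums : List Int) (k : Nat) (h0 : 0 < k) (hk : k ≤ nums.length) :
    (nums.take k).getLast? = nums[k-1]? := by
  rw [List.getLast?_eq_getElem?, List.length_take, min_eq_left hk,
    List.getElem?_take_of_lt (by omega)]

theorem chain_take_succ (nums : List Int) (k : Nat) (hk : k < nums.length) :
    List.IsChain (· < ·) (nums.take (k + 1)) ↔
      List.IsChain (· < ·) (nums.take k) ∧ (k = 0 ∨ nums.getD (k - 1) 0 < nums.getD k 0) := by
  rw [List.take_add_one, List.getElem?_eq_getElem hk]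
  simp only [Option.toList_some, List.isChain_append]
  rcases Nat.eq_zero_or_pos k with rfl | h0
  · simp
  · rw [getLast?_take_eq nums k h0 (by omega),
      List.getElem?_eq_getElem (show k - 1 < nums.length by omega),
      show nums.getD (k-1) 0 = nums[k-1] from List.getD_eq_getElem _ _ (by omega),
      show nums.getD k 0 = nums[k] from List.getD_eq_getElem _ _ hk]
    simp [Nat.pos_iff_ne_zero.mp h0]

-- B's condition at j is exactly "nums with index j removed is strictly increasing"
theorem condAt_iff (nums : List Int) (j : Nat) (hj : j < nums.length) :
    condAt nums j ↔ List.IsChain (· < ·) (nums.eraseIdx j) := by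
  rw [condAt, List.eraseIdx_eq_take_drop_succ, List.isChain_append]
  refine and_congr_right fun _ => and_congr_right fun _ => ?_
  rw [List.head?_drop]
  rcases Nat.eq_zero_or_pos j with rfl | h0
  · simp
  · rw [getLast?_take_eq nums j h0 (by omega)]
    by_cases hlast : j = nums.length - 1
    · have hnone : nums[j+1]? = none := by
        rw [List.getElem?_eq_none_iff]; omega
      rw [hlast] at hnone
      simp [hnone, hlast]
    · have hj1 : j + 1 < nums.length := by omega
      rw [List.getElem?_eq_getElem hj1,
        List.getElem?_eq_getElem (show j - 1 < nums.length by omega),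
        show nums.getD (j-1) 0 = nums[j-1] from List.getD_eq_getElem _ _ (by omega),
        show nums.getD (j+1) 0 = nums[j+1] from List.getD_eq_getElem _ _ hj1]
      simp [Nat.pos_iff_ne_zero.mp h0, hlast]

theorem headD_eq_getD_zero (l : List Bool) (d : Bool) : l.headD d = l.getD 0 d := by
  cases l <;> rfl

theorem sufArr_getD_iff (nums : List Int) (k : Nat) :
    (sufArr nums).getD k true = true ↔ List.IsChain (· < ·) (nums.drop k) := by
  induction nums generalizing k with
  | nil => cases k <;> simp [sufArr]
  | cons a rest ih =>
    cases k with
    | succ k => simpa [sufArr] using ih k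
    | zero =>
      cases rest with
      | nil => simp [sufArr]
      | cons b t =>
        have h0 : (sufArr (a :: b :: t)).getD 0 true
            = (decide (a < b) && (sufArr (b :: t)).headD true) := rfl
        rw [h0, headD_eq_getD_zero, Bool.and_eq_true, decide_eq_true_iff, ih 0]
        simp [List.isChain_cons_cons]

theorem altLoop_inv (nums : List Int) (rest : List Int) :
    ∀ (k : Nat) (seen : PySem.Set Int) (pre : Bool),
    rest = nums.drop k →
    (∀ v, PySem.Set.contains seen v = true ↔ v ∈ nums.take k) →
    (pre = true ↔ List.IsChain (· < ·) (nums.take k)) →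
    (altLoop nums (sufArr nums) nums.length rest k seen pre = true ↔
      ∀ j, k ≤ j → j < nums.length → nums.getD j 0 ∉ nums.take j → condAt nums j) := by
  induction rest with
  | nil =>
    intro k seen pre hrest hseen hpre
    have hk : nums.length ≤ k := by
      by_contra h
      have := List.drop_eq_nil_iff.mp hrest.symm
      omega
    simp only [altLoop, true_iff]
    intro j hkj hj
    omega
  | cons v rs ih =>
    intro k seen pre hrest hseen hpre
    have hk : k < nums.length := by
      by_contra h
      rw [List.drop_eq_nil_of_le (by omega)] at hrest
      simp at hrest
    have hvd : nums[k] :: nums.drop (k+1) = v :: rs := by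
      rw [List.getElem_cons_drop hk, ← hrest]
    have hv : nums[k] = v := by injection hvd
    have hrs : rs = nums.drop (k+1) := by injection hvd with _ h; exact h.symm
    -- the accumulator invariants for the recursive call
    have hseen' : ∀ w, PySem.Set.contains (PySem.Set.add seen v) w = true ↔ w ∈ nums.take (k+1) := by
      intro w
      rw [PySem.Set.contains_iff, PySem.Set.mem_add, List.take_add_one,
        List.getElem?_eq_getElem hk, hv]
      simp only [Option.toList_some, List.mem_append, List.mem_singleton]
      rw [← PySem.Set.contains_iff, hseen w]
    have hpre' : (if 0 < k then pre && decide (nums.getD (k - 1) 0 < nums.getD k 0) else pre) = true ↔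
        List.IsChain (· < ·) (nums.take (k+1)) := by
      rw [chain_take_succ nums k hk]
      rcases Nat.eq_zero_or_pos k with rfl | h0
      · simp [hpre]
      · simp only [if_pos h0, Bool.and_eq_true, decide_eq_true_iff, hpre,
          Nat.pos_iff_ne_zero.mp h0, false_or]
    -- the boolean per-index condition is condAt
    have hc2 : (pre && (sufArr nums).getD (k + 1) true &&
          (decide (k = 0) || decide (k = nums.length - 1) ||
            decide (nums.getD (k - 1) 0 < nums.getD (k + 1) 0))) = true ↔ condAt nums k := by
      simp only [Bool.and_eq_true, Bool.or_eq_true, decide_eq_true_iff, hpre,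
        sufArr_getD_iff, condAt]
      tauto
    have hfo : nums.getD k 0 = v := by rw [List.getD_eq_getElem _ _ hk, hv]
    by_cases hvseen : v ∈ nums.take k
    · have hc1 : PySem.Set.contains seen v = true := (hseen v).mpr hvseen
      simp only [altLoop, hc1, Bool.not_true, Bool.false_and, Bool.false_eq_true, if_false]
      rw [ih (k+1) _ _ hrs hseen' hpre']
      constructor
      · intro H j hkj hj hf
        rcases Nat.eq_or_lt_of_le hkj with rfl | h
        · exact absurd (hfo ▸ hvseen) hf
        · exact H j h hj hf
      · intro H j hkj hj hf
        exact H j (by omega) hj hf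
    · have hc1 : PySem.Set.contains seen v = false := by
        rw [Bool.eq_false_iff]
        intro h
        exact hvseen ((hseen v).mp h)
      by_cases hcond : condAt nums k
      · have hc2t := hc2.mpr hcond
        simp only [altLoop, hc1, hc2t, Bool.not_true, Bool.not_false, Bool.true_and,
          Bool.false_eq_true, if_false]
        rw [ih (k+1) _ _ hrs hseen' hpre']
        constructor
        · intro H j hkj hj hf
          rcases Nat.eq_or_lt_of_le hkj with rfl | h
          · exact hcond
          · exact H j h hj hf
        · intro H j hkj hj hf
          exact H j (by omega) hj hf
      · have hc2f : (pre && (sufArr nums).getD (k + 1) true &&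
            (decide (k = 0) || decide (k = nums.length - 1) ||
              decide (nums.getD (k - 1) 0 < nums.getD (k + 1) 0))) = false := by
          rw [Bool.eq_false_iff]; intro h; exact hcond (hc2.mp h)
        simp only [altLoop, hc1, hc2f, Bool.not_false, Bool.true_and, if_true]
        exact iff_of_false (by simp) (fun H => hcond (H k le_rfl hk (hfo ▸ hvseen)))

theorem alt_iff (nums : List Int) :
    check_inc_alt nums = true ↔
      ∀ j, j < nums.length → nums.getD j 0 ∉ nums.take j → condAt nums j := by
  rw [show check_inc_alt nums
      = altLoop nums (sufArr nums) nums.length nums 0 PySem.Set.empty true from rfl,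
    altLoop_inv nums nums 0 PySem.Set.empty true (by simp)
      (fun v => by rw [PySem.Set.contains_iff]; simp [PySem.Set.empty])
      (by simp)]
  exact ⟨fun H j => H j (Nat.zero_le j), fun H j _ => H j⟩

-- ===== VERDICT (by name: the statement is the Claim_ definition above) =====
theorem check_inc_spec : Claim_equal_check_inc := by
  intro nums _
  unfold Spec_check_inc
  rw [Bool.eq_iff_iff]
  rw [show check_inc nums = aLoop nums nums from rfl,
    aLoop_iff nums nums (fun _ h => h), bridge_iff, alt_iff]
  constructor
  · intro h j hj hf; exact (condAt_iff nums j hj).mpr (h j hj hf)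
  · intro h j hj hf; exact (condAt_iff nums j hj).mp (h j hj hf)
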